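-- pv_equiv track=rewrite | github.com/edpypf/PythonCode | Waterloo/2011/test.py | distribute_pie
-- ===== SOURCE A (Python) =====
-- def distribute_pie(n, k):
--     distributions = []
--     stack = [(1, [1])]
--
--     while stack:
--         curr_sum, curr_dist = stack.pop()
--
--         if len(curr_dist) == k:
--             if curr_sum == n:
--                 distributions.append(curr_dist)
--
--         else:
--             for i in range(1, n-curr_sum+2):
--                 new_sum = curr_sum + i
--                 if new_sum <= n:
--                     stack.append((new_sum, curr_dist + [i]))
--
--     return distributions
-- ===== SOURCE B (Python) =====
-- def distribute_pie(n, k):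
--     # Recursive DFS that forces the last part to n - current_sum instead of
--     # scanning all candidates at the final level; children tried in descending
--     # order to reproduce A's stack (LIFO) output order.
--     if k == 1:
--         return [[1]] if n == 1 else []
--     if k < 1:
--         return []
--     out = []
--     def rec(prefix, s):
--         if len(prefix) == k - 1:
--             last = n - s
--             if last >= 1:
--                 out.append(prefix + [last])
--         else:
--             for i in range(n - s, 0, -1):
--                 rec(prefix + [i], s + i)
--     rec([1], 1)
--     return out
-- ===== Notes on version B (the rewrite author's own statement) =====
-- stated objective: alternative
-- what changed: Replaced the explicit-stack worklist that enumerates and sum-tests every candidate for the last part with a recursive DFS that computes the forced last part n-sum directly, skipping the whole final level of the search tree.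
import Mathlib
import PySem

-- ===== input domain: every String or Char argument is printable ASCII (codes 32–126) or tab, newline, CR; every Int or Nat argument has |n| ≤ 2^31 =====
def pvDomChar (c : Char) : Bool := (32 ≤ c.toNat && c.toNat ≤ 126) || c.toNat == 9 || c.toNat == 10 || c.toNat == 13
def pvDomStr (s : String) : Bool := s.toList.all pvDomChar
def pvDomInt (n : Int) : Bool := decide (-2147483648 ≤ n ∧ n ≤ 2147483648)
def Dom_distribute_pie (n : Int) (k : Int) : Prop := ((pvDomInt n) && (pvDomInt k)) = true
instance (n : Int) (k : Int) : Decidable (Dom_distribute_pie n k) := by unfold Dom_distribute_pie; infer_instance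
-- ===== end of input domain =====

-- B replaces A's stack worklist (which scans and sum-tests every candidate for the last
-- part) by a recursive DFS that writes the forced last part n - sum directly.


-- ===== PORT A =====
-- the while-loop; stack top = list head (Python appends/pops at the end).
-- fuel is only a totality guard: pvFuelA n is proved sufficient (pvLoopA_eq below).
def pvLoopA (n k : Int) : Nat → List (Int × List Int) → List (List Int) → List (List Int)
  | 0, _, acc => acc
  | _ + 1, [], acc => acc
  | fuel + 1, (s, d) :: rest, acc =>
    if (d.length : Int) = k then
      if s = n then pvLoopA n k fuel rest (acc ++ [d])
      else pvLoopA n k fuel rest acc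
    else
      pvLoopA n k fuel
        ((PySem.List.pyRange 1 (n - s + 2) 1).foldl
          (fun st i => if s + i ≤ n then (s + i, d ++ [i]) :: st else st) rest) acc

def pvFuelA (n : Int) : Nat := 2 ^ (n - 1).toNat

def distribute_pie (n : Int) (k : Int) : List (List Int) :=
  pvLoopA n k (pvFuelA n) [(1, [1])] []

-- ===== PORT B =====
def pvRecB (n k : Int) (pre : List Int) (s : Int) : List (List Int) :=
  if (pre.length : Int) = k - 1 then
    if 1 ≤ n - s then [pre ++ [n - s]] else []
  else
    (PySem.List.pyRange (n - s) 0 (-1)).attach.flatMap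
      (fun x => pvRecB n k (pre ++ [x.1]) (s + x.1))
termination_by (n - s).toNat
decreasing_by
  have h := PySem.List.mem_pyRange_neg_one.mp x.2
  omega

def distribute_pie_alt (n : Int) (k : Int) : List (List Int) :=
  if k = 1 then (if n = 1 then [[1]] else [])
  else if k < 1 then []
  else pvRecB n k [1] 1

-- ===== PRECONDITION & SPEC =====
def Spec_distribute_pie (n : Int) (k : Int) (out : List (List Int)) : Prop := out = distribute_pie_alt n k
instance (n : Int) (k : Int) (out : List (List Int)) : Decidable (Spec_distribute_pie n k out) := by unfold Spec_distribute_pie; infer_instance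

-- ===== CLAIM (what is proved, stated in full; the proofs are below) =====
def Claim_equal_distribute_pie : Prop := ∀ (n : Int) (k : Int), Dom_distribute_pie n k → Spec_distribute_pie n k (distribute_pie n k)

-- ===== LEMMAS AND PROOFS =====

-- [m, m-1, ..., 1] : the order in which both programs emit children
def pvDesc : Nat → List Int
  | 0 => []
  | m + 1 => ((m : Int) + 1) :: pvDesc m

lemma mem_pvDesc : ∀ (m : Nat) (x : Int), x ∈ pvDesc m ↔ 1 ≤ x ∧ x ≤ (m : Int) := by
  intro m
  induction m with
  | zero => intro x; simp [pvDesc]; omega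
  | succ m ih =>
    intro x
    simp only [pvDesc, List.mem_cons, ih]
    constructor
    · rintro (rfl | ⟨h1, h2⟩) <;> constructor <;> push_cast <;> omega
    · rintro ⟨h1, h2⟩
      by_cases hx : x = (m : Int) + 1
      · exact Or.inl hx
      · exact Or.inr ⟨h1, by push_cast at h2 ⊢; omega⟩

-- common recursive DFS both ports compute
def pvDfs (n k : Int) (s : Int) (d : List Int) : List (List Int) :=
  if (d.length : Int) = k then (if s = n then [d] else [])
  else
    (pvDesc (n - s).toNat).attach.flatMap
      (fun x => pvDfs n k (s + x.1) (d ++ [x.1]))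
termination_by (n - s).toNat
decreasing_by
  have h := (mem_pvDesc _ _).mp x.2
  omega

lemma flatMap_congr_mem {α β : Type} (l : List α) (f g : α → List β)
    (h : ∀ x ∈ l, f x = g x) : l.flatMap f = l.flatMap g := by
  induction l with
  | nil => rfl
  | cons a l ih =>
    simp only [List.flatMap_cons]
    rw [h a (by simp), ih (fun x hx => h x (by simp [hx]))]

lemma attach_flatMap {α β : Type} (l : List α) (f : α → List β) :
    l.attach.flatMap (fun x => f x.1) = l.flatMap f := by
  induction l with
  | nil => rfl
  | cons a l ih =>
    conv_rhs => rw [← List.attach_map_subtype_val (a :: l)]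
    rw [List.flatMap_map]

-- weight of a stack entry and of a stack
def pvW (n s : Int) : Nat := 2 ^ (n - s).toNat
def pvMu (n : Int) (st : List (Int × List Int)) : Nat := (st.map (fun e => pvW n e.1)).sum

lemma pyRange_desc : ∀ (m : Nat) (a : Int), a.toNat = m → PySem.List.pyRange a 0 (-1) = pvDesc m := by
  intro m
  induction m with
  | zero =>
    intro a h
    rw [PySem.List.pyRange_neg_one_eq_nil (by omega)]; rfl
  | succ m ih =>
    intro a h
    rw [PySem.List.pyRange_neg_one_cons (by omega), ih (a - 1) (by omega)]
    have ha : a = (m : Int) + 1 := by omega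
    rw [ha]
    rfl

lemma foldl_push (n s : Int) (d : List Int) :
    ∀ (l : List Int) (rest : List (Int × List Int)),
      l.foldl (fun st i => if s + i ≤ n then (s + i, d ++ [i]) :: st else st) rest
        = ((l.filter (fun i => s + i ≤ n)).reverse.map (fun i => (s + i, d ++ [i]))) ++ rest := by
  intro l
  induction l with
  | nil => intro rest; simp
  | cons x l ih =>
    intro rest
    by_cases hx : s + x ≤ n
    · simp [List.foldl_cons, hx, ih]
    · simp [List.foldl_cons, hx, ih]

lemma children_eq (n s : Int) :
    ((PySem.List.pyRange 1 (n - s + 2) 1).filter (fun i => s + i ≤ n)).reverse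
      = pvDesc (n - s).toNat := by
  rcases le_or_gt 0 (n - s) with h | h
  · have hsplit := PySem.List.pyRange_one_append 1 (n - s + 1) (n - s + 2) (by omega) (by omega)
    rw [hsplit, List.filter_append]
    have h1 : (PySem.List.pyRange 1 (n - s + 1) 1).filter (fun i => s + i ≤ n)
        = PySem.List.pyRange 1 (n - s + 1) 1 := by
      apply List.filter_eq_self.mpr
      intro x hx
      have := PySem.List.mem_pyRange_one.mp hx
      simp only [decide_eq_true_eq]
      omega
    have h2 : (PySem.List.pyRange (n - s + 1) (n - s + 2) 1).filter (fun i => s + i ≤ n) = [] := by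
      have e : n - s + 2 = (n - s + 1) + 1 := by ring
      rw [e, PySem.List.pyRange_one_singleton]
      simp only [List.filter_cons, List.filter_nil, decide_eq_true_eq]
      rw [if_neg (by omega)]
    rw [h1, h2, List.append_nil]
    rw [← pyRange_desc (n - s).toNat (n - s) rfl,
        PySem.List.pyRange_neg_one_eq_reverse]
    norm_num
  · have h1 : PySem.List.pyRange 1 (n - s + 2) 1 = [] :=
      PySem.List.pyRange_one_eq_nil (by omega)
    have h2 : (n - s).toNat = 0 := by omega
    rw [h1, h2]; rfl

lemma sum_pow_desc : ∀ (m c : Nat), m ≤ c →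
    ((pvDesc m).map (fun i => 2 ^ ((c : Int) - i).toNat)).sum = 2 ^ c - 2 ^ (c - m) := by
  intro m
  induction m with
  | zero => intro c _; simp [pvDesc]
  | succ m ih =>
    intro c hc
    have hm : m ≤ c := by omega
    simp only [pvDesc, List.map_cons, List.sum_cons, ih c hm]
    have e1 : (((c : Int)) - ((m : Int) + 1)).toNat = c - (m + 1) := by omega
    rw [e1]
    have h1 : 2 ^ (c - m) = 2 * 2 ^ (c - (m + 1)) := by
      rw [← pow_succ']
      congr 1
      omega
    have h2 : 2 ^ (c - (m + 1)) ≤ 2 ^ c := Nat.pow_le_pow_right (by omega) (by omega)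
    have h3 : 2 ^ (c - m) ≤ 2 ^ c := Nat.pow_le_pow_right (by omega) (by omega)
    omega

lemma pvMu_append (n : Int) (a b : List (Int × List Int)) :
    pvMu n (a ++ b) = pvMu n a + pvMu n b := by
  simp [pvMu]

lemma pvMu_children (n s : Int) (d : List Int) :
    pvMu n ((pvDesc (n - s).toNat).map (fun i => (s + i, d ++ [i])))
      = 2 ^ (n - s).toNat - 1 := by
  rcases le_or_gt (n - s) 0 with h | h
  · have : (n - s).toNat = 0 := by omega
    rw [this]; rfl
  · have hc : ((n - s).toNat : Int) = n - s := by omega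
    have := sum_pow_desc (n - s).toNat (n - s).toNat le_rfl
    simp only [Nat.sub_self, pow_zero] at this
    rw [pvMu, List.map_map]
    have heq : ((fun e : Int × List Int => pvW n e.1) ∘ (fun i => (s + i, d ++ [i])))
        = fun i => 2 ^ (((n - s).toNat : Int) - i).toNat := by
      funext i
      simp only [Function.comp, pvW, hc]
      congr 2
      omega
    rw [heq, this]

lemma pvMu_pos (n : Int) (e : Int × List Int) (rest : List (Int × List Int)) :
    1 ≤ pvMu n (e :: rest) := by
  simp only [pvMu, List.map_cons, List.sum_cons]
  have : 1 ≤ pvW n e.1 := Nat.one_le_two_pow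
  omega

lemma pvDfs_leaf (n k s : Int) (d : List Int) (h : (d.length : Int) = k) :
    pvDfs n k s d = if s = n then [d] else [] := by
  rw [pvDfs, if_pos h]

lemma pvDfs_node (n k s : Int) (d : List Int) (h : ¬ (d.length : Int) = k) :
    pvDfs n k s d = (pvDesc (n - s).toNat).flatMap (fun i => pvDfs n k (s + i) (d ++ [i])) := by
  rw [pvDfs, if_neg h]
  exact attach_flatMap (pvDesc (n - s).toNat) (fun i => pvDfs n k (s + i) (d ++ [i]))

lemma pvRecB_leaf (n k : Int) (pre : List Int) (s : Int) (h : (pre.length : Int) = k - 1) :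
    pvRecB n k pre s = if 1 ≤ n - s then [pre ++ [n - s]] else [] := by
  rw [pvRecB, if_pos h]

lemma pvRecB_node (n k : Int) (pre : List Int) (s : Int) (h : ¬ (pre.length : Int) = k - 1) :
    pvRecB n k pre s
      = (PySem.List.pyRange (n - s) 0 (-1)).flatMap (fun i => pvRecB n k (pre ++ [i]) (s + i)) := by
  rw [pvRecB, if_neg h]
  exact attach_flatMap (PySem.List.pyRange (n - s) 0 (-1)) (fun i => pvRecB n k (pre ++ [i]) (s + i))

lemma pvLoopA_eq (n k : Int) : ∀ (fuel : Nat) (st : List (Int × List Int)) (acc : List (List Int)),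
    pvMu n st ≤ fuel →
    pvLoopA n k fuel st acc = acc ++ st.flatMap (fun e => pvDfs n k e.1 e.2) := by
  intro fuel
  induction fuel with
  | zero =>
    intro st acc h
    cases st with
    | nil => simp [pvLoopA]
    | cons e rest => exact absurd h (by have := pvMu_pos n e rest; omega)
  | succ fuel ih =>
    intro st acc h
    cases st with
    | nil => simp [pvLoopA]
    | cons e rest =>
      obtain ⟨s, d⟩ := e
      have hmu : pvMu n ((s, d) :: rest) = pvW n s + pvMu n rest := by
        simp [pvMu]
      by_cases hl : (d.length : Int) = k
      · have hrest : pvMu n rest ≤ fuel := by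
          have : 1 ≤ pvW n s := Nat.one_le_two_pow
          omega
        by_cases hs : s = n
        · simp only [pvLoopA, if_pos hl, if_pos hs, ih _ _ hrest]
          rw [List.flatMap_cons, pvDfs_leaf n k s d hl, if_pos hs]
          simp
        · simp only [pvLoopA, if_pos hl, if_neg hs, ih _ _ hrest]
          rw [List.flatMap_cons, pvDfs_leaf n k s d hl, if_neg hs]
          simp
      · simp only [pvLoopA, if_neg hl]
        rw [foldl_push, children_eq]
        have hmu' : pvMu n ((pvDesc (n - s).toNat).map (fun i => (s + i, d ++ [i])) ++ rest) ≤ fuel := by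
          rw [pvMu_append, pvMu_children]
          have h1 : 1 ≤ 2 ^ (n - s).toNat := Nat.one_le_two_pow
          have : pvW n s = 2 ^ (n - s).toNat := rfl
          omega
        rw [ih _ _ hmu']
        rw [List.flatMap_append, List.flatMap_map, List.flatMap_cons,
            pvDfs_node n k s d hl]

lemma flat_nil (n s : Int) (d : List Int) :
    ∀ (m : Nat), (m : Int) < n - s →
      (pvDesc m).flatMap (fun i => if s + i = n then [d ++ [i]] else []) = [] := by
  intro m
  induction m with
  | zero => intro _; rfl
  | succ m ih =>
    intro h
    simp only [pvDesc, List.flatMap_cons]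
    rw [if_neg (by omega), ih (by omega)]
    rfl

lemma pvDfs_overflow (n k : Int) : ∀ (m : Nat) (s : Int) (d : List Int),
    (n - s).toNat = m → k < (d.length : Int) → pvDfs n k s d = [] := by
  intro m
  induction m using Nat.strong_induction_on with
  | _ m ih =>
    intro s d hm hk
    rw [pvDfs_node n k s d (by omega)]
    rw [flatMap_congr_mem _ _ (fun _ => []) ?_]
    · simp
    intro i hi
    have hmem := (mem_pvDesc _ _).mp hi
    rw [hm] at hmem
    exact ih (n - (s + i)).toNat (by omega) (s + i) (d ++ [i]) rfl
      (by simp; omega)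

lemma pvDfs_eq_recB (n k : Int) : ∀ (m : Nat) (s : Int) (d : List Int),
    (n - s).toNat = m → (d.length : Int) ≤ k - 1 → pvDfs n k s d = pvRecB n k d s := by
  intro m
  induction m using Nat.strong_induction_on with
  | _ m ih =>
    intro s d hm hd
    by_cases h1 : (d.length : Int) = k - 1
    · -- final level: B writes the forced last part
      rw [pvDfs_node n k s d (by omega), pvRecB_leaf n k d s h1]
      have hleaf : ∀ i ∈ pvDesc (n - s).toNat,
          pvDfs n k (s + i) (d ++ [i]) = if s + i = n then [d ++ [i]] else [] := by
        intro i _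
        exact pvDfs_leaf n k (s + i) (d ++ [i]) (by simp; omega)
      rw [flatMap_congr_mem _ _ _ hleaf]
      rcases le_or_gt (n - s) 0 with hns | hns
      · have h0 : (n - s).toNat = 0 := by omega
        rw [h0, if_neg (by omega)]; rfl
      · have hc : ((n - s).toNat : Int) = n - s := by omega
        rw [if_pos (by omega)]
        obtain ⟨m', hm'⟩ : ∃ m', (n - s).toNat = m' + 1 := ⟨(n - s).toNat - 1, by omega⟩
        rw [hm', pvDesc, List.flatMap_cons]
        rw [if_pos (by rw [hm'] at hc; push_cast at hc ⊢; omega)]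
        rw [flat_nil n s d m' (by rw [hm'] at hc; push_cast at hc ⊢; omega)]
        have : (m' : Int) + 1 = n - s := by rw [hm'] at hc; push_cast at hc ⊢; omega
        simp [this]
    · -- internal level: same descending children on both sides
      rw [pvDfs_node n k s d (by omega), pvRecB_node n k d s h1,
          pyRange_desc m (n - s) hm, ← hm]
      apply flatMap_congr_mem
      intro i hi
      have hmem := (mem_pvDesc _ _).mp hi
      rw [hm] at hmem
      exact ih (n - (s + i)).toNat (by omega) (s + i) (d ++ [i]) rfl
        (by simp; omega)

-- ===== VERDICT (by name: the statement is the Claim_ definition above) =====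
theorem distribute_pie_spec : Claim_equal_distribute_pie := by
  unfold Claim_equal_distribute_pie Spec_distribute_pie
  intro n k _
  have hstart : distribute_pie n k = pvDfs n k 1 [1] := by
    unfold distribute_pie
    rw [pvLoopA_eq n k (pvFuelA n) [(1, [1])] [] (by simp [pvMu, pvW, pvFuelA])]
    simp
  rw [hstart]
  unfold distribute_pie_alt
  by_cases hk1 : k = 1
  · rw [if_pos hk1, pvDfs_leaf n k 1 [1] (by simp [hk1])]
    by_cases hn : n = 1
    · rw [if_pos (by omega), if_pos hn]
    · rw [if_neg (by omega), if_neg hn]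
  · rw [if_neg hk1]
    by_cases hk0 : k < 1
    · rw [if_pos hk0]
      exact pvDfs_overflow n k (n - 1).toNat 1 [1] rfl (by simp; omega)
    · rw [if_neg hk0]
      exact pvDfs_eq_recB n k (n - 1).toNat 1 [1] rfl (by simp; omega)
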